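-- pv_equiv track=rewrite | github.com/ilkaxd/AdventOfCode | 2020/12.12/answer.py | rotation_axis
-- ===== SOURCE A (Python) =====
-- def rotation_axis(east, north, direction, value):
--     for _ in range(value//90):
--         if direction=="L":
--             old_north=north
--             north=east
--             east=-old_north
--         else:
--             old_east=east
--             east=north
--             north=-old_east
--     return east, north
-- ===== SOURCE B (Python) =====
-- def rotation_axis(east, north, direction, value):
--     steps = value // 90
--     if steps <= 0:
--         return east, north
--     k = steps % 4
--     if direction != "L":
--         k = (-k) % 4
--     if k == 1:
--         return -north, east
--     if k == 2:
--         return -east, -north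
--     if k == 3:
--         return north, -east
--     return east, north
-- ===== Notes on version B (the rewrite author's own statement) =====
-- stated objective: faster
-- what changed: Replaces the O(value/90) loop of repeated 90-degree rotations with an O(1) closed-form rotation chosen by the step count reduced mod 4.
import Mathlib
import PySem

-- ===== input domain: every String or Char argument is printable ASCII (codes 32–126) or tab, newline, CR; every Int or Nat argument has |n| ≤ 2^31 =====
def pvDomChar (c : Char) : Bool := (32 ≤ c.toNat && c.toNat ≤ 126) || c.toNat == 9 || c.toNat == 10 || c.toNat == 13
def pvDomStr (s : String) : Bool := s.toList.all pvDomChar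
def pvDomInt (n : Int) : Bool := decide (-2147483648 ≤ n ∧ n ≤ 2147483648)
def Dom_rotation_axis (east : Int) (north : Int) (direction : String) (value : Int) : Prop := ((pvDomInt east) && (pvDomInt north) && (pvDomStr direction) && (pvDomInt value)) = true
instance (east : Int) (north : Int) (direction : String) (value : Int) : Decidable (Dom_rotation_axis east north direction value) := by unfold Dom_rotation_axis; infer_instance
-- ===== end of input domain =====

-- B replaces A's O(value/90) loop of single 90° rotations by the O(1) closed-form rotation for the step count mod 4.

-- ===== PORT A =====
-- for _ in range(value//90): rotate (east, north) one quarter turn (left if direction=="L", right otherwise)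
def rotation_axis (east : Int) (north : Int) (direction : String) (value : Int) : List Int :=
  let p := (PySem.List.pyRange 0 (PySem.Int.floordiv value 90) 1).foldl
    (fun (p : Int × Int) _ => if direction == "L" then (-p.2, p.1) else (p.2, -p.1))
    (east, north)
  [p.1, p.2]

-- ===== PORT B =====
def rotation_axis_alt (east : Int) (north : Int) (direction : String) (value : Int) : List Int :=
  let steps := PySem.Int.floordiv value 90
  if steps ≤ 0 then [east, north]
  else
    let k0 := PySem.Int.mod steps 4
    let k := if direction == "L" then k0 else PySem.Int.mod (-k0) 4
    if k = 1 then [-north, east]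
    else if k = 2 then [-east, -north]
    else if k = 3 then [north, -east]
    else [east, north]

-- ===== PRECONDITION & SPEC =====
def Spec_rotation_axis (east : Int) (north : Int) (direction : String) (value : Int) (out : List Int) : Prop := out = rotation_axis_alt east north direction value
instance (east : Int) (north : Int) (direction : String) (value : Int) (out : List Int) : Decidable (Spec_rotation_axis east north direction value out) := by unfold Spec_rotation_axis; infer_instance

-- ===== CLAIM (what is proved, stated in full; the proofs are below) =====
def Claim_equal_rotation_axis : Prop := ∀ (east : Int) (north : Int) (direction : String) (value : Int), Dom_rotation_axis east north direction value → Spec_rotation_axis east north direction value (rotation_axis east north direction value)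

-- ===== LEMMAS AND PROOFS =====

-- a foldl whose step ignores the list element is an iterate of the step function
theorem foldl_const_iterate {α β : Type} (f : α → α) (l : List β) (init : α) :
    l.foldl (fun a _ => f a) init = f^[l.length] init := by
  induction l generalizing init with
  | nil => rfl
  | cons x xs ih => simp [List.foldl_cons, ih, Function.iterate_succ_apply]

-- both quarter-turn steps have period 4
theorem rot_iterate_mod {f : Int × Int → Int × Int}
    (h4 : ∀ p, f (f (f (f p))) = p) (m : ℕ) (p : Int × Int) :
    f^[m] p = f^[m % 4] p := by
  induction m using Nat.strong_induction_on with
  | _ m ih =>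
    by_cases hm : m < 4
    · rw [Nat.mod_eq_of_lt hm]
    · have hm4 : m = (m - 4) + 4 := by omega
      have : f^[m] p = f^[m - 4] p := by
        rw [hm4, Function.iterate_add_apply]
        congr 1
        show f^[1+1+1+1] p = p
        simp only [Function.iterate_add_apply, Function.iterate_one]
        exact h4 p
      rw [this, ih (m - 4) (by omega)]
      congr 1
      omega

theorem rotL_four (p : Int × Int) :
    (fun p : Int × Int => (-p.2, p.1)) ((fun p : Int × Int => (-p.2, p.1)) ((fun p : Int × Int => (-p.2, p.1)) ((fun p : Int × Int => (-p.2, p.1)) p))) = p := by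
  simp

theorem rotR_four (p : Int × Int) :
    (fun p : Int × Int => (p.2, -p.1)) ((fun p : Int × Int => (p.2, -p.1)) ((fun p : Int × Int => (p.2, -p.1)) ((fun p : Int × Int => (p.2, -p.1)) p))) = p := by
  simp

-- ===== VERDICT (by name: the statement is the Claim_ definition above) =====
theorem rotation_axis_spec : Claim_equal_rotation_axis := by
  intro east north direction value _
  unfold Spec_rotation_axis rotation_axis rotation_axis_alt
  set steps := PySem.Int.floordiv value 90 with hsteps
  simp only
  rw [foldl_const_iterate, PySem.List.length_pyRange_one]
  by_cases hle : steps ≤ 0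
  · have h0 : steps.toNat = 0 := by omega
    simp [hle, h0]
  · have hpos : 0 < steps := by omega
    set m : ℕ := steps.toNat with hm
    have hmlen : (steps - 0).toNat = m := by omega
    have hmod : PySem.Int.mod steps 4 = ((m % 4 : ℕ) : Int) := by
      rw [PySem.Int.mod_eq_emod_of_pos (by norm_num)]
      omega
    have hr4 : m % 4 < 4 := Nat.mod_lt _ (by norm_num)
    rw [hmlen]
    simp only [if_neg hle, hmod]
    by_cases hdir : direction == "L"
    · simp only [hdir, if_pos]
      rw [rot_iterate_mod rotL_four]
      interval_cases h : m % 4 <;>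
        simp [Function.iterate_succ_apply, Function.iterate_zero]
    · simp only [hdir, if_false, Bool.false_eq_true]
      rw [rot_iterate_mod rotR_four]
      interval_cases h : m % 4 <;>
        simp [Function.iterate_succ_apply, Function.iterate_zero, PySem.Int.mod]
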